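-- pv_equiv track=rewrite | github.com/Derek-94/Python_solution_code | silliconValley/3.py | concat_wave_and_add
-- ===== SOURCE A (Python) =====
-- def concat_more(long_w, short_w):
--     i = 0;
--     longer_w = [];
--     while(1):
--         longer_w.append(short_w[i]);
--         i += 1;
--         if i == len(short_w):
--             i = 0;
--         if len(longer_w) == len(long_w):
--             break;
--     return longer_w;
--
-- def concat_wave_and_add(w1, w2):
--     if len(w2) < len(w1):
--         if(len(w1) % len(w2)) :
--             long_w2 = concat_more(w1, w2);
--             return [x + y for x, y in zip(w1, long_w2)];
--         else:
--             long_w2 = [];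
--             while len(long_w2) != len(w1):
--                 long_w2 = long_w2 + w2
--             return [x + y for x, y in zip(w1, long_w2)];
--
--     elif len(w1) < len(w2):
--         if(len(w2) % len(w1)):
--             long_w1 = concat_more(w2, w1);
--             return [x + y for x, y in zip(long_w1, w2)];
--         else:
--             long_w1 = [];
--             while len(long_w1) != len(w2):
--                 long_w1 = long_w1 + w1;
--             return [x + y for x, y in zip(long_w1, w2)];
--     else:
--         return [x + y for x, y in zip(w1, w2)];
-- ===== SOURCE B (Python) =====
-- def concat_wave_and_add(w1, w2):
--     n = max(len(w1), len(w2))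
--     return [w1[i % len(w1)] + w2[i % len(w2)] for i in range(n)]
-- ===== Notes on version B (the rewrite author's own statement) =====
-- stated objective: simpler
-- what changed: Replaced A's three-way length/divisibility branching with materialized cycled lists (element-by-element cycling or repeated list doubling) by a single modulo-indexed comprehension over range(max(len(w1),len(w2))).
import Mathlib
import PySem

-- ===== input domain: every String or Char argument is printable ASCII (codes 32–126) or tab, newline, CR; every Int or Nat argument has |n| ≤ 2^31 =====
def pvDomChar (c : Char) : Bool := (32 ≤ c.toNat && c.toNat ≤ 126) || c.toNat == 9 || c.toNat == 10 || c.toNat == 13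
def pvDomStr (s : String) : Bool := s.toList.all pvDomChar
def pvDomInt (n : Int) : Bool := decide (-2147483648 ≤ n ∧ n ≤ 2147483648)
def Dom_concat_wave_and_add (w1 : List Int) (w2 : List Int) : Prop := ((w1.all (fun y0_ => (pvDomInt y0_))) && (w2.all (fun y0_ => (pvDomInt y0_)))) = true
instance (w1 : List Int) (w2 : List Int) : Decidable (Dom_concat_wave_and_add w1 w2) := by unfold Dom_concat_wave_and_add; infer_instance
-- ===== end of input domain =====

-- B replaces A's three-way branching with materialized cycled lists by one
-- modulo-indexed pass over range(max(len(w1), len(w2))) (objective: simpler).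

-- ===== PORT A =====
-- the while(1) loop of concat_more: append short_w[i], cycle i, stop when the
-- built list reaches long_w's length; fuel = long_w.length iterations, exactly
-- the number of appends the Python loop performs (short_w[i] is always in range
-- here, so getD is exact).
def concatMoreGo (shortW : List Int) : Nat → Nat → List Int → List Int
  | 0, _, acc => acc
  | k+1, i, acc =>
    let acc' := acc ++ [shortW.getD i 0]
    let i' := i + 1
    let i'' := if i' = shortW.length then 0 else i'
    concatMoreGo shortW k i'' acc'

def concatMore (longW shortW : List Int) : List Int :=
  concatMoreGo shortW longW.length 0 []

-- the 'while len(long_w2) != len(w1): long_w2 = long_w2 + w2' loop; fuel =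
-- target iterations, enough since each iteration adds at least one element
-- (the loop is only reached with the divisor nonempty under Pre_).
def repConcat (target : Nat) (w : List Int) : Nat → List Int → List Int
  | 0, acc => acc
  | k+1, acc => if acc.length = target then acc else repConcat target w k (acc ++ w)

-- [x + y for x, y in zip(a, b)]
def zipAdd (a b : List Int) : List Int := (List.zip a b).map (fun p => p.1 + p.2)

def concat_wave_and_add (w1 : List Int) (w2 : List Int) : List Int :=
  if w2.length < w1.length then
    if w1.length % w2.length ≠ 0 then
      zipAdd w1 (concatMore w1 w2)
    else
      zipAdd w1 (repConcat w1.length w2 w1.length [])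
  else if w1.length < w2.length then
    if w2.length % w1.length ≠ 0 then
      zipAdd (concatMore w2 w1) w2
    else
      zipAdd (repConcat w2.length w1 w2.length []) w2
  else
    zipAdd w1 w2

-- ===== PORT B =====
-- [w1[i % len(w1)] + w2[i % len(w2)] for i in range(max(len(w1), len(w2)))];
-- i % len is a nonnegative in-range index for nonempty lists (Pre_), so getD is exact.
def concat_wave_and_add_alt (w1 : List Int) (w2 : List Int) : List Int :=
  (List.range (max w1.length w2.length)).map
    (fun i => w1.getD (i % w1.length) 0 + w2.getD (i % w2.length) 0)

-- ===== PRECONDITION & SPEC =====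
-- Pre_ excludes exactly the inputs where one wave is empty and the other is not:
-- there Python A raises ZeroDivisionError on len % 0 (and Python B raises the same).
def Pre_concat_wave_and_add (w1 : List Int) (w2 : List Int) : Prop := (w1 = [] ↔ w2 = [])
instance (w1 : List Int) (w2 : List Int) : Decidable (Pre_concat_wave_and_add w1 w2) := by
  unfold Pre_concat_wave_and_add; infer_instance

def pvWitness_concat_wave_and_add : List Int × List Int := ([1, 2, 3], [10, 20])

def Spec_concat_wave_and_add (w1 : List Int) (w2 : List Int) (out : List Int) : Prop := out = concat_wave_and_add_alt w1 w2
instance (w1 : List Int) (w2 : List Int) (out : List Int) : Decidable (Spec_concat_wave_and_add w1 w2 out) := by unfold Spec_concat_wave_and_add; infer_instance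

-- ===== CLAIM (what is proved, stated in full; the proofs are below) =====
def Claim_equal_concat_wave_and_add : Prop := ∀ (w1 : List Int) (w2 : List Int), Dom_concat_wave_and_add w1 w2 → Pre_concat_wave_and_add w1 w2 → Spec_concat_wave_and_add w1 w2 (concat_wave_and_add w1 w2)

-- ===== LEMMAS AND PROOFS =====

-- the canonical cycled list: l repeated/truncated to length n
def cyc (l : List Int) (n : Nat) : List Int :=
  (List.range n).map (fun i => l.getD (i % l.length) 0)

theorem map_getD_range (l : List Int) :
    (List.range l.length).map (fun i => l.getD i 0) = l := by
  apply List.ext_getElem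
  · simp
  · intro i h1 h2
    simp only [List.getElem_map, List.getElem_range]
    exact List.getD_eq_getElem l 0 h2

theorem cyc_self (l : List Int) : cyc l l.length = l := by
  unfold cyc
  rw [List.map_congr_left (g := fun i => l.getD i 0) ?_, map_getD_range]
  intro i hi
  rw [Nat.mod_eq_of_lt (List.mem_range.mp hi)]

theorem concatMoreGo_eq (shortW : List Int) (hs : shortW ≠ [])
    (k : Nat) : ∀ (i : Nat) (acc : List Int), i = acc.length % shortW.length →
    concatMoreGo shortW k i acc =
      acc ++ (List.range k).map (fun j => shortW.getD ((acc.length + j) % shortW.length) 0) := by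
  induction k with
  | zero => intro i acc _; simp [concatMoreGo]
  | succ k ih =>
    intro i acc hi
    have hlen : 0 < shortW.length := List.length_pos_iff.mpr hs
    have hilt : i < shortW.length := hi ▸ Nat.mod_lt _ hlen
    show concatMoreGo shortW k _ _ = _
    subst hi
    have hnext : (if acc.length % shortW.length + 1 = shortW.length then 0
          else acc.length % shortW.length + 1)
        = (acc ++ [shortW.getD (acc.length % shortW.length) 0]).length % shortW.length := by
      simp only [List.length_append, List.length_cons, List.length_nil, Nat.zero_add]
      rcases Nat.lt_or_ge (acc.length % shortW.length + 1) shortW.length with h | h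
      · rw [if_neg (Nat.ne_of_lt h)]
        have hL : 1 % shortW.length = 1 := Nat.mod_eq_of_lt (by omega)
        have key : (acc.length + 1) % shortW.length
            = acc.length % shortW.length + 1 := by
          conv_lhs => rw [Nat.add_mod]
          rw [hL]
          exact Nat.mod_eq_of_lt h
        exact key.symm
      · have hiL : acc.length % shortW.length + 1 = shortW.length := by omega
        rw [if_pos hiL]
        by_cases h1 : shortW.length = 1
        · simp [h1, Nat.mod_one]
        · have key : (acc.length + 1) % shortW.length = 0 := by
            conv_lhs => rw [Nat.add_mod]
            rw [Nat.mod_eq_of_lt (show 1 < shortW.length by omega), hiL, Nat.mod_self]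
          exact key.symm
    rw [ih _ _ hnext]
    simp only [List.length_append, List.length_cons, List.length_nil, List.append_assoc]
    congr 1
    rw [List.range_succ_eq_map]
    simp only [List.map_cons, List.map_map, List.cons_append, List.nil_append]
    congr 1
    apply List.map_congr_left
    intro j _
    have hj : acc.length + 1 + j = acc.length + (j + 1) := by omega
    simp [Function.comp, hj, Nat.succ_eq_add_one]

theorem concatMore_eq (longW shortW : List Int) (hs : shortW ≠ []) :
    concatMore longW shortW = cyc shortW longW.length := by
  unfold concatMore cyc
  rw [concatMoreGo_eq shortW hs longW.length 0 [] (by simp)]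
  simp

theorem flatten_replicate_eq_cyc (w : List Int) (m : Nat) :
    (List.replicate m w).flatten = cyc w (m * w.length) := by
  induction m with
  | zero => simp [cyc]
  | succ m ih =>
    rw [List.replicate_succ, List.flatten_cons, ih]
    unfold cyc
    have : (m + 1) * w.length = w.length + m * w.length := by ring
    rw [this, List.range_add, List.map_append, List.map_map]
    congr 1
    · exact (cyc_self w).symm
    · apply List.map_congr_left
      intro j _
      simp only [Function.comp_apply]
      rw [Nat.add_mod_left]

theorem repConcat_eq (target : Nat) (w : List Int) (hw : w ≠ []) :
    ∀ (k : Nat) (acc : List Int), acc.length ≤ target →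
      w.length ∣ (target - acc.length) → target ≤ acc.length + k →
    repConcat target w k acc =
      acc ++ (List.replicate ((target - acc.length) / w.length) w).flatten := by
  intro k
  induction k with
  | zero =>
    intro acc hle _ hfuel
    have : acc.length = target := by omega
    simp [repConcat, this]
  | succ k ih =>
    intro acc hle hdvd hfuel
    by_cases heq : acc.length = target
    · simp [repConcat, heq]
    · have hwpos : 0 < w.length := List.length_pos_iff.mpr hw
      have hlt : acc.length < target := lt_of_le_of_ne hle heq
      have hge : w.length ≤ target - acc.length := Nat.le_of_dvd (by omega) hdvd
      rw [repConcat, if_neg heq]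
      rw [ih (acc ++ w) (by simp; omega)
          (by simp only [List.length_append]
              have : target - (acc.length + w.length) = (target - acc.length) - w.length := by omega
              rw [this]
              exact Nat.dvd_sub hdvd dvd_rfl)
          (by simp; omega)]
      rw [List.append_assoc]
      congr 1
      obtain ⟨q, hq⟩ := hdvd
      have hq1 : 1 ≤ q := by
        rcases q with _ | q
        · omega
        · omega
      have hm : (target - acc.length) / w.length = q := by
        rw [hq, Nat.mul_div_cancel_left _ hwpos]
      have hm2 : (target - (acc ++ w).length) / w.length = q - 1 := by
        simp only [List.length_append]
        have h2 : w.length * (q - 1) + w.length = w.length * q := by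
          conv_rhs => rw [show q = (q - 1) + 1 by omega]
          ring
        have h3 : target - (acc.length + w.length) = w.length * (q - 1) := by omega
        rw [h3, Nat.mul_div_cancel_left _ hwpos]
      rw [hm, hm2]
      conv_rhs => rw [show q = (q - 1) + 1 by omega]
      rw [List.replicate_succ, List.flatten_cons]

theorem zipAdd_cyc (w1 w2 : List Int) (n : Nat) :
    zipAdd (cyc w1 n) (cyc w2 n) =
      (List.range n).map (fun i => w1.getD (i % w1.length) 0 + w2.getD (i % w2.length) 0) := by
  unfold zipAdd cyc
  rw [List.zip_map', List.map_map]
  rfl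

theorem zipAdd_self_cyc (w1 w2 : List Int) (h : w2.length ≤ w1.length) :
    zipAdd w1 (cyc w2 w1.length) = concat_wave_and_add_alt w1 w2 := by
  unfold concat_wave_and_add_alt
  rw [Nat.max_eq_left h, ← zipAdd_cyc, cyc_self]

theorem zipAdd_cyc_self (w1 w2 : List Int) (h : w1.length ≤ w2.length) :
    zipAdd (cyc w1 w2.length) w2 = concat_wave_and_add_alt w1 w2 := by
  unfold concat_wave_and_add_alt
  rw [Nat.max_eq_right h, ← zipAdd_cyc, cyc_self]

theorem repConcat_cyc (target : Nat) (w : List Int) (hw : w ≠ []) (hd : w.length ∣ target) :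
    repConcat target w target [] = cyc w target := by
  rw [repConcat_eq target w hw target [] (by simp) (by simpa using hd) (by simp)]
  simp only [List.length_nil, Nat.sub_zero, List.nil_append]
  rw [flatten_replicate_eq_cyc, Nat.div_mul_cancel hd]

-- ===== VERDICT (by name: the statement is the Claim_ definition above) =====
theorem concat_wave_and_add_spec : Claim_equal_concat_wave_and_add := by
  intro w1 w2 _ hpre
  unfold Pre_concat_wave_and_add at hpre
  show concat_wave_and_add w1 w2 = concat_wave_and_add_alt w1 w2
  unfold concat_wave_and_add
  split_ifs with h21 hm h12 hm2
  · have h2ne : w2 ≠ [] := by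
      intro h
      rw [hpre.mpr h] at h21
      simp [h] at h21
    rw [concatMore_eq w1 w2 h2ne, zipAdd_self_cyc w1 w2 (le_of_lt h21)]
  · have h2ne : w2 ≠ [] := by
      intro h
      rw [hpre.mpr h] at h21
      simp [h] at h21
    rw [repConcat_cyc w1.length w2 h2ne (Nat.dvd_of_mod_eq_zero (not_not.mp hm)),
      zipAdd_self_cyc w1 w2 (le_of_lt h21)]
  · have h1ne : w1 ≠ [] := by
      intro h
      rw [hpre.mp h] at h12
      simp [h] at h12
    rw [concatMore_eq w2 w1 h1ne, zipAdd_cyc_self w1 w2 (le_of_lt h12)]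
  · have h1ne : w1 ≠ [] := by
      intro h
      rw [hpre.mp h] at h12
      simp [h] at h12
    rw [repConcat_cyc w2.length w1 h1ne (Nat.dvd_of_mod_eq_zero (not_not.mp hm2)),
      zipAdd_cyc_self w1 w2 (le_of_lt h12)]
  · have heq : w1.length = w2.length := by omega
    rw [← zipAdd_self_cyc w1 w2 (le_of_eq heq.symm), heq, cyc_self]
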